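-- pv_equiv track=rewrite | github.com/DhruvMeduri/Stadium_Seating | Set Cover/addon.py | diamond_waste
-- ===== SOURCE A (Python) =====
-- import math
--
-- def diamond_waste(wasted,size):
--     # Input: Set of wasted seats initially empty and the length of the diagonal of the diamond.
--     # Output: Returns the seats wasted by removing the corners of the square to make a diamond_shape
--     for r in range(math.ceil(size/2)):
--        for c in range(math.ceil(size/2)):
--            if r + c < math.ceil(size/2) - 1 :
--                wasted.add((r*size) + c)
--                wasted.add((r*size) + size - 1 - c )
--                wasted.add(((size-r-1)*size) + c)
--                wasted.add(((size-r-1)*size) + size - 1 - c)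
--     return wasted
-- ===== SOURCE B (Python) =====
-- import math
--
-- def diamond_waste(wasted, size):
--     # Strength-reduced sweep: four mirror cursors advanced by +-1 per cell
--     # (no per-cell index arithmetic from (r, c)); indices collected into a
--     # list and applied in one bulk set update.
--     k = math.ceil(size / 2)
--     new = []
--     tl = 0                    # top-left cursor
--     bl = (size - 1) * size    # bottom-left cursor
--     row = k - 1               # cells in the current triangle row
--     while row > 0:
--         tr = tl + size - 1    # top-right cursor
--         br = bl + size - 1    # bottom-right cursor
--         for _ in range(row):
--             new += [tl, tr, bl, br]
--             tl += 1
--             tr -= 1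
--             bl += 1
--             br -= 1
--         tl += size - row      # jump cursors to the start of the next row
--         bl -= size + row
--         row -= 1
--     wasted.update(new)
--     return wasted
-- ===== Notes on version B (the rewrite author's own statement) =====
-- stated objective: alternative
-- what changed: Replaces A's guarded k-by-k quadrant scan that recomputes four reflected indices from (r,c) per cell by a strength-reduced while-sweep of four mirror cursors advanced by +-1 per cell (with a per-row rebase), collecting indices into a list and applying one bulk set update.
import Mathlib
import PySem

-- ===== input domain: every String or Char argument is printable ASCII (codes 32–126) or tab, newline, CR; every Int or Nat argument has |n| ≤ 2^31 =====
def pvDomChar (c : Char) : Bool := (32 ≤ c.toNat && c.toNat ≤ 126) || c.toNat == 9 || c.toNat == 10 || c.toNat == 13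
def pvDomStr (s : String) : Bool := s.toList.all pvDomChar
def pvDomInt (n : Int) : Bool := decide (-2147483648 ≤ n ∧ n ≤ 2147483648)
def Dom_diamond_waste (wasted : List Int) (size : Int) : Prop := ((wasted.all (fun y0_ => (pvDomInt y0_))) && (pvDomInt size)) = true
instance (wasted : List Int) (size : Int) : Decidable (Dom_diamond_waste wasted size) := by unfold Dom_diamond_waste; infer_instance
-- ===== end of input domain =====

-- B replaces A's guarded quadrant scan (four reflected indices recomputed from (r,c) per cell) by a strength-reduced while-sweep of four ±1 cursors plus one bulk set update (alternative algorithm; return-value equivalence — both Pythons also mutate the argument set identically).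


-- ===== PORT A =====
-- math.ceil(size/2) on an int in the stated domain is exactly ceiling division, -((-size)//2)
def diamond_waste (wasted : List Int) (size : Int) : List Int :=
  let k := -(PySem.Int.floordiv (-size) 2)
  (PySem.List.pyRange 0 k 1).foldl (fun w r =>
    (PySem.List.pyRange 0 k 1).foldl (fun w c =>
      if r + c < k - 1 then
        PySem.Set.add (PySem.Set.add (PySem.Set.add (PySem.Set.add w
          (r * size + c)) (r * size + size - 1 - c))
          ((size - r - 1) * size + c)) ((size - r - 1) * size + size - 1 - c)
      else w) w) wasted

-- ===== PORT B =====
-- inner 'for _ in range(row)' loop of Source B: emit the four cursors, advance them by ±1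
def dwInner : Nat → List Int → Int → Int → Int → Int → List Int × Int × Int × Int × Int
  | 0, new, tl, tr, bl, br => (new, tl, tr, bl, br)
  | n + 1, new, tl, tr, bl, br =>
      dwInner n (new ++ [tl, tr, bl, br]) (tl + 1) (tr - 1) (bl + 1) (br - 1)

-- outer 'while row > 0' loop of Source B
def dwOuter (size : Int) (row : Int) (new : List Int) (tl bl : Int) : List Int :=
  if _h : 0 < row then
    let s := dwInner row.toNat new tl (tl + size - 1) bl (bl + size - 1)
    dwOuter size (row - 1) s.1 (s.2.1 + size - row) (s.2.2.2.1 - size - row)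
  else new
termination_by row.toNat
decreasing_by omega

def diamond_waste_alt (wasted : List Int) (size : Int) : List Int :=
  let k := -(PySem.Int.floordiv (-size) 2)
  PySem.Set.update wasted (dwOuter size (k - 1) [] 0 ((size - 1) * size))

-- ===== PRECONDITION & SPEC =====
def Spec_diamond_waste (wasted : List Int) (size : Int) (out : List Int) : Prop := out = diamond_waste_alt wasted size
instance (wasted : List Int) (size : Int) (out : List Int) : Decidable (Spec_diamond_waste wasted size out) := by unfold Spec_diamond_waste; infer_instance

-- ===== CLAIM (what is proved, stated in full; the proofs are below) =====
def Claim_equal_diamond_waste : Prop := ∀ (wasted : List Int) (size : Int), Dom_diamond_waste wasted size → Spec_diamond_waste wasted size (diamond_waste wasted size)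

-- ===== LEMMAS AND PROOFS =====

-- the four reflected indices A emits for quadrant cell (r, c)
def pvQuad (size r c : Int) : List Int :=
  [r * size + c, r * size + size - 1 - c,
   (size - r - 1) * size + c, (size - r - 1) * size + size - 1 - c]

-- A's inner loop over row r equals folding Set.add over the triangular row of pvQuad
lemma pvRow (size k r : Int) (hr0 : 0 ≤ r) (w : List Int) :
    (PySem.List.pyRange 0 k 1).foldl (fun w c =>
      if r + c < k - 1 then
        PySem.Set.add (PySem.Set.add (PySem.Set.add (PySem.Set.add w
          (r * size + c)) (r * size + size - 1 - c))
          ((size - r - 1) * size + c)) ((size - r - 1) * size + size - 1 - c)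
      else w) w
    = ((PySem.List.pyRange 0 (k - 1 - r) 1).flatMap (pvQuad size r)).foldl PySem.Set.add w := by
  by_cases hk : k - 1 - r ≤ 0
  · rw [PySem.List.pyRange_one_eq_nil hk]
    rw [PySem.List.foldl_congr_mem _ _ (fun w _ => w) w ?_, List.foldl_fixed]
    · simp
    · intro acc x hx
      rw [PySem.List.mem_pyRange_one] at hx
      rw [if_neg (show ¬(r + x < k - 1) by omega)]
  · rw [PySem.List.pyRange_one_append 0 (k - 1 - r) k (by omega) (by omega),
        List.foldl_append]
    have h1 : (PySem.List.pyRange 0 (k - 1 - r) 1).foldl (fun w c =>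
        if r + c < k - 1 then
          PySem.Set.add (PySem.Set.add (PySem.Set.add (PySem.Set.add w
            (r * size + c)) (r * size + size - 1 - c))
            ((size - r - 1) * size + c)) ((size - r - 1) * size + size - 1 - c)
        else w) w
        = ((PySem.List.pyRange 0 (k - 1 - r) 1).flatMap (pvQuad size r)).foldl PySem.Set.add w := by
      rw [List.foldl_flatMap, PySem.List.foldl_congr_mem]
      intro acc x hx
      rw [PySem.List.mem_pyRange_one] at hx
      rw [if_pos (show r + x < k - 1 by omega)]
      simp [pvQuad]
    rw [h1]
    rw [PySem.List.foldl_congr_mem _ _ (fun w _ => w) _ ?_, List.foldl_fixed]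
    intro acc x hx
    rw [PySem.List.mem_pyRange_one] at hx
    rw [if_neg (show ¬(r + x < k - 1) by omega)]

-- A equals one bulk Set.update with the triangular flat list of quadrant cells
lemma pvMainA (size k : Int) (wasted : List Int) :
    (PySem.List.pyRange 0 k 1).foldl (fun w r =>
      (PySem.List.pyRange 0 k 1).foldl (fun w c =>
        if r + c < k - 1 then
          PySem.Set.add (PySem.Set.add (PySem.Set.add (PySem.Set.add w
            (r * size + c)) (r * size + size - 1 - c))
            ((size - r - 1) * size + c)) ((size - r - 1) * size + size - 1 - c)
        else w) w) wasted
    = PySem.Set.update wasted ((PySem.List.pyRange 0 (k - 1) 1).flatMap (fun r =>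
        (PySem.List.pyRange 0 (k - 1 - r) 1).flatMap (pvQuad size r))) := by
  rw [PySem.List.foldl_congr_mem _ _
        (fun w r => ((PySem.List.pyRange 0 (k - 1 - r) 1).flatMap (pvQuad size r)).foldl PySem.Set.add w)
        wasted ?_]
  · show _ = List.foldl PySem.Set.add wasted _
    rw [List.foldl_flatMap]
    by_cases hk : k ≤ 0
    · rw [PySem.List.pyRange_one_eq_nil hk, PySem.List.pyRange_one_eq_nil (by omega : k - 1 ≤ (0:Int))]
    · rw [PySem.List.pyRange_one_append 0 (k - 1) k (by omega) (by omega),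
          List.foldl_append, PySem.List.pyRange_one_cons (by omega : k - 1 < k),
          PySem.List.pyRange_one_eq_nil (by omega : k ≤ k - 1 + 1)]
      simp only [List.foldl_cons, List.foldl_nil,
        PySem.List.pyRange_one_eq_nil (by omega : k - 1 - (k - 1) ≤ (0:Int))]
      simp
  · intro acc r hr
    rw [PySem.List.mem_pyRange_one] at hr
    exact pvRow size k r hr.1 acc

-- the inner cursor loop emits the row of quads and advances all four cursors by n
lemma pvInner (n : Nat) : ∀ (new : List Int) (tl tr bl br : Int),
    dwInner n new tl tr bl br
    = (new ++ (List.range n).flatMap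
        (fun i : Nat => [tl + (i : Int), tr - (i : Int), bl + (i : Int), br - (i : Int)]),
       tl + n, tr - n, bl + n, br - n) := by
  induction n with
  | zero => intro new tl tr bl br; simp [dwInner]
  | succ m ih =>
    intro new tl tr bl br
    rw [dwInner, ih, List.range_succ_eq_map]
    simp only [List.flatMap_cons, List.flatMap_map, Prod.mk.injEq]
    refine ⟨?_, by push_cast; ring, by push_cast; ring, by push_cast; ring, by push_cast; ring⟩
    rw [List.append_assoc]
    congr 1
    congr 1
    · norm_num
    · congr 1
      funext a
      push_cast
      simp only [List.cons.injEq, and_true]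
      refine ⟨by ring, by ring, by ring, by ring⟩

-- the outer cursor sweep, started at row r, emits the remaining triangle rows r..k-2
lemma pvOuter (size k : Int) (j : Nat) : ∀ (r : Int) (new : List Int),
    (k - 1 - r).toNat = j →
    dwOuter size (k - 1 - r) new (r * size) ((size - 1 - r) * size)
    = new ++ (PySem.List.pyRange r (k - 1) 1).flatMap (fun r' =>
        (PySem.List.pyRange 0 (k - 1 - r') 1).flatMap (pvQuad size r')) := by
  induction j with
  | zero =>
    intro r new hj
    rw [dwOuter, dif_neg (by omega), PySem.List.pyRange_one_eq_nil (by omega : k - 1 ≤ r)]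
    simp
  | succ m ih =>
    intro r new hj
    have hrow : 0 < k - 1 - r := by omega
    rw [dwOuter, dif_pos hrow]
    simp only [pvInner]
    have hcast : ((k - 1 - r).toNat : Int) = k - 1 - r := by omega
    have hrowflat : (List.range (k - 1 - r).toNat).flatMap
        (fun i : Nat => [r * size + (i : Int), r * size + size - 1 - (i : Int),
                   (size - 1 - r) * size + (i : Int), (size - 1 - r) * size + size - 1 - (i : Int)])
        = (PySem.List.pyRange 0 (k - 1 - r) 1).flatMap (pvQuad size r) := by
      rw [PySem.List.pyRange_one, List.flatMap_map,
          show k - 1 - r - 0 = k - 1 - r from by ring]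
      congr 1
      funext i
      simp only [pvQuad, zero_add, List.cons.injEq, and_true]
      refine ⟨trivial, trivial, by ring, by ring⟩
    have htl : r * size + ((k - 1 - r).toNat : Int) + size - (k - 1 - r) = (r + 1) * size := by
      rw [hcast]; ring
    have hbl : (size - 1 - r) * size + ((k - 1 - r).toNat : Int) - size - (k - 1 - r)
        = (size - 1 - (r + 1)) * size := by
      rw [hcast]; ring
    have hnext : k - 1 - r - 1 = k - 1 - (r + 1) := by ring
    rw [hrowflat, htl, hbl, hnext, ih (r + 1) _ (by omega)]
    rw [PySem.List.pyRange_one_cons (by omega : r < k - 1)]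
    simp [List.append_assoc]

-- ===== VERDICT (by name: the statement is the Claim_ definition above) =====
theorem diamond_waste_spec : Claim_equal_diamond_waste := by
  intro wasted size _
  simp only [Spec_diamond_waste, diamond_waste, diamond_waste_alt]
  rw [pvMainA size (-(PySem.Int.floordiv (-size) 2)) wasted]
  have h0 := pvOuter size (-(PySem.Int.floordiv (-size) 2))
      (-(PySem.Int.floordiv (-size) 2) - 1 - 0).toNat 0 [] rfl
  simp only [sub_zero, zero_mul, List.nil_append] at h0
  rw [h0]
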